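-- pv_equiv track=rewrite | github.com/mal1on/checkio-solutions | Scientific Expedition/The Hollow Diamond.py | hollow_diamond
-- ===== SOURCE A (Python) =====
-- from string import ascii_lowercase as alphabet
-- from collections import deque
--
-- def hollow_diamond(side: int, length: int, cw: bool) -> str:
--
--     letters = deque(alphabet[:length] + (4 * side - 4 - length) * '*')
--     diamond = (side - 1) * ' ' + letters.popleft() + '\n'
--     outer = list(range(side - 2, -1, -1)) + list(range(1, side - 1))
--     inner = [1]
--     for el in range(side - 2):
--         inner.append(inner[-1] + 2)
--     inner += inner[:-1][::-1]
--     for i in range(len(outer)):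
--         if cw:
--             diamond += outer[i] * ' ' + letters.pop() + \
--                 inner[i] * ' ' + letters.popleft() + '\n'
--         else:
--             diamond += outer[i] * ' ' + letters.popleft() + \
--                 inner[i] * ' ' + letters.pop() + '\n'
--     diamond += (side - 1) * ' ' + letters.pop()
--
--     return diamond
-- ===== SOURCE B (Python) =====
-- from string import ascii_lowercase as alphabet
--
-- def hollow_diamond(side: int, length: int, cw: bool) -> str:
--     # Index-based construction on the letter string: no deque, no outer/inner
--     # lists -- each row's spacing and its two letters come from closed formulas.
--     letters = alphabet[:length] + (4 * side - 4 - length) * '*'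
--     n = len(letters)
--     m = 2 * side - 3 if side >= 2 else 0
--     rows = [(side - 1) * ' ' + letters[0]]
--     for i in range(m):
--         o = side - 2 - i if i <= side - 2 else i - side + 2
--         inn = 2 * i + 1 if i <= side - 2 else 4 * side - 7 - 2 * i
--         front, back = letters[i + 1], letters[n - 1 - i]
--         left, right = (back, front) if cw else (front, back)
--         rows.append(o * ' ' + left + inn * ' ' + right)
--     rows.append((side - 1) * ' ' + letters[n - 1 - m])
--     return '\n'.join(rows)
-- ===== Notes on version B (the rewrite author's own statement) =====
-- stated objective: alternative
-- what changed: B computes each row directly from closed index formulas into the letter string (front index i+1, back index n-1-i, spacing formulas in i) and joins rows with ' ', instead of A's consuming a deque from both ends while materialising outer/inner spacing lists.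
import Mathlib
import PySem

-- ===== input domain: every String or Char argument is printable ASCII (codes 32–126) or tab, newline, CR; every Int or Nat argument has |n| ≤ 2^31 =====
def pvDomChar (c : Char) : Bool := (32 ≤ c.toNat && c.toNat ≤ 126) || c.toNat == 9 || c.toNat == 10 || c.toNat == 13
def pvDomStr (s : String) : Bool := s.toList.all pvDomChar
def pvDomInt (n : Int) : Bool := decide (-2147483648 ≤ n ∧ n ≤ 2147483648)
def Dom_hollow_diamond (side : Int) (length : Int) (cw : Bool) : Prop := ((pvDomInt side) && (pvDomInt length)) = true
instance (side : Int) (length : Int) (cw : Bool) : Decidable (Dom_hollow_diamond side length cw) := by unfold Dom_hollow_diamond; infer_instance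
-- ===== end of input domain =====

-- B builds each diamond row from closed index formulas into the letter string
-- instead of consuming a deque and materialising outer/inner spacing lists
-- (objective: alternative decomposition, same cost).

-- ===== PORT A =====
-- letters = alphabet[:length] + (4*side-4-length)*'*'   (the same first line in A and in B)
def pvAlphabet : List Char :=
  ['a','b','c','d','e','f','g','h','i','j','k','l','m',
   'n','o','p','q','r','s','t','u','v','w','x','y','z']

def pvLetters (side : Int) (length : Int) : List Char :=
  PySem.List.slice pvAlphabet none (some length) ++
  PySem.List.pyRepeat ['*'] (4 * side - 4 - length)

-- outer = list(range(side-2,-1,-1)) + list(range(1,side-1))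
def pvOuter (side : Int) : List Int :=
  PySem.List.pyRange (side - 2) (-1) (-1) ++ PySem.List.pyRange 1 (side - 1) 1

-- inner = [1]; for el in range(side-2): inner.append(inner[-1]+2); inner += inner[:-1][::-1]
def pvInner (side : Int) : List Int :=
  let inner1 := (PySem.List.pyRange 0 (side - 2) 1).foldl
      (fun acc _ => acc ++ [acc.getLastD 0 + 2]) [1]
  inner1 ++ inner1.dropLast.reverse

-- one iteration of A's loop body; the deque ops are hand-ported exactly:
-- popleft = headD/tail, pop = getLastD/dropLast; the '!' default is reached
-- exactly where Python raises IndexError (those inputs are excluded by Pre_).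
def pvStepA (cw : Bool) (outer inner : List Int) (st : List Char × List Char) (i : Nat) :
    List Char × List Char :=
  if cw then
    let c1 := st.2.getLastD '!'
    let q1 := st.2.dropLast
    let c2 := q1.headD '!'
    let q2 := q1.tail
    (st.1 ++ PySem.List.pyRepeat [' '] (PySem.List.pyGetD outer (i : Int) 0) ++ [c1]
          ++ PySem.List.pyRepeat [' '] (PySem.List.pyGetD inner (i : Int) 0) ++ [c2] ++ ['\n'], q2)
  else
    let c1 := st.2.headD '!'
    let q1 := st.2.tail
    let c2 := q1.getLastD '!'
    let q2 := q1.dropLast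
    (st.1 ++ PySem.List.pyRepeat [' '] (PySem.List.pyGetD outer (i : Int) 0) ++ [c1]
          ++ PySem.List.pyRepeat [' '] (PySem.List.pyGetD inner (i : Int) 0) ++ [c2] ++ ['\n'], q2)

def hollow_diamond (side : Int) (length : Int) (cw : Bool) : String :=
  let letters0 := pvLetters side length
  let diamond0 := PySem.List.pyRepeat [' '] (side - 1) ++ [letters0.headD '!'] ++ ['\n']
  let letters1 := letters0.tail
  let outer := pvOuter side
  let inner := pvInner side
  let st := (List.range outer.length).foldl (pvStepA cw outer inner) (diamond0, letters1)
  String.ofList (st.1 ++ PySem.List.pyRepeat [' '] (side - 1) ++ [st.2.getLastD '!'])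

-- ===== PORT B =====
-- row i of the middle part: both spacings and both letters come from closed
-- formulas in i; no deque, no outer/inner lists.
def pvRowB (side : Int) (letters : List Char) (n : Int) (cw : Bool) (i : Nat) : List Char :=
  let o : Int := if (i : Int) ≤ side - 2 then side - 2 - i else i - side + 2
  let inn : Int := if (i : Int) ≤ side - 2 then 2 * i + 1 else 4 * side - 7 - 2 * i
  let front := PySem.List.pyGetD letters ((i : Int) + 1) '!'
  let back := PySem.List.pyGetD letters (n - 1 - i) '!'
  let lr := if cw then (back, front) else (front, back)
  PySem.List.pyRepeat [' '] o ++ [lr.1] ++ PySem.List.pyRepeat [' '] inn ++ [lr.2]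

-- one step of A's loop, evaluated on the invariant state

def hollow_diamond_alt (side : Int) (length : Int) (cw : Bool) : String :=
  let letters := pvLetters side length
  let n : Int := letters.length
  let m : Int := if 2 ≤ side then 2 * side - 3 else 0
  let rows : List (List Char) :=
    [PySem.List.pyRepeat [' '] (side - 1) ++ [PySem.List.pyGetD letters 0 '!']] ++
    (List.range m.toNat).map (pvRowB side letters n cw) ++
    [PySem.List.pyRepeat [' '] (side - 1) ++ [PySem.List.pyGetD letters (n - 1 - m) '!']]
  String.ofList (PySem.Chars.join ['\n'] rows)

-- ===== PRECONDITION & SPEC =====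
-- Pre_ = exactly the inputs on which A's deque never runs empty, i.e. the letter
-- string holds at least the 2*m+2 characters the loop consumes (m = number of
-- middle rows); on all other inputs the Python A raises IndexError.
def Pre_hollow_diamond (side : Int) (length : Int) (cw : Bool) : Prop :=
  2 * (if 2 ≤ side then 2 * side - 3 else 0) + 2 ≤
    (if 0 ≤ length then min length 26 else max 0 (26 + length)) + max 0 (4 * side - 4 - length)
instance (side : Int) (length : Int) (cw : Bool) : Decidable (Pre_hollow_diamond side length cw) := by
  unfold Pre_hollow_diamond; infer_instance

def pvWitness_hollow_diamond : Int × Int × Bool := (3, 8, true)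

def Spec_hollow_diamond (side : Int) (length : Int) (cw : Bool) (out : String) : Prop := out = hollow_diamond_alt side length cw
instance (side : Int) (length : Int) (cw : Bool) (out : String) : Decidable (Spec_hollow_diamond side length cw out) := by unfold Spec_hollow_diamond; infer_instance

-- ===== CLAIM (what is proved, stated in full; the proofs are below) =====
def Claim_equal_hollow_diamond : Prop := ∀ (side : Int) (length : Int) (cw : Bool), Dom_hollow_diamond side length cw → Pre_hollow_diamond side length cw → Spec_hollow_diamond side length cw (hollow_diamond side length cw)

-- ===== LEMMAS AND PROOFS =====

-- proof-only abbreviations: the number of middle rows, and the inner-spacing formula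
def pvM (side : Int) : Nat := (if 2 ≤ side then 2 * side - 3 else 0).toNat

def pvG (k : Nat) : Int := 2 * (k : Int) + 1

theorem pv_headD_eq_getD {α : Type} (l : List α) (d : α) : l.headD d = l.getD 0 d := by
  cases l <;> rfl

theorem pv_getLastD_drop_take {α : Type} (L : List α) (a t : Nat) (d : α)
    (ht : 0 < t) (hle : a + t ≤ L.length) :
    ((L.drop a).take t).getLastD d = L.getD (a + t - 1) d := by
  have hlen : ((L.drop a).take t).length = t := by
    simp [List.length_take, List.length_drop]; omega
  rw [List.getLastD_eq_getLast?, List.getLast?_eq_getElem?, hlen,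
      List.getD_eq_getElem?_getD, List.getElem?_take, List.getElem?_drop]
  have h1 : t - 1 < t := by omega
  simp [h1]
  congr 2
  omega

theorem pv_headD_drop_take {α : Type} (L : List α) (a t : Nat) (d : α)
    (ht : 0 < t) (_ha : a < L.length) :
    ((L.drop a).take t).headD d = L.getD a d := by
  rw [List.headD_eq_head?, List.head?_eq_getElem?, List.getD_eq_getElem?_getD,
      List.getElem?_take, List.getElem?_drop]
  simp [ht]

theorem pv_tail_drop_take {α : Type} (L : List α) (a t : Nat) :
    ((L.drop a).take t).tail = (L.drop (a + 1)).take (t - 1) := by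
  rw [← List.drop_one, List.drop_take, List.drop_drop]

theorem pv_dropLast_drop_take {α : Type} (L : List α) (a t : Nat) (hle : a + t ≤ L.length) :
    ((L.drop a).take t).dropLast = (L.drop a).take (t - 1) := by
  rw [List.dropLast_eq_take, List.take_take]
  congr 1
  simp [List.length_take, List.length_drop]
  omega

theorem pv_join_cons (c : Char) (x : List Char) (xs : List (List Char)) :
    PySem.Chars.join [c] (x :: xs) = x ++ (xs.map (fun r => [c] ++ r)).flatten := by
  induction xs generalizing x with
  | nil => simp [PySem.Chars.join_singleton]
  | cons y ys ih =>
      rw [PySem.Chars.join_cons_cons, ih y]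
      simp

theorem pv_shift (c : Char) (rs : List (List Char)) (t : List Char) :
    [c] ++ (rs.map (fun r => r ++ [c])).flatten ++ t
      = (rs.map (fun r => [c] ++ r)).flatten ++ [c] ++ t := by
  induction rs with
  | nil => simp
  | cons r rs ih =>
      simp only [List.map_cons, List.flatten_cons, List.append_assoc] at ih ⊢
      rw [← ih]

theorem pv_slice_length (xs : List Char) (length : Int) :
    (PySem.List.slice xs none (some length)).length
      = (if 0 ≤ length then min length.toNat xs.length else xs.length - (-length).toNat) := by
  split
  · next h =>
      rw [PySem.List.slice_to _ h]
      simp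
  · next h =>
      have hk : 0 < (-length).toNat := by omega
      have : length = -(((-length).toNat : Nat) : Int) := by omega
      rw [this, PySem.List.slice_to_neg_natCast _ _ hk]
      simp
      omega

theorem pv_letters_length (side length : Int) :
    (pvLetters side length).length
      = (if 0 ≤ length then min length.toNat 26 else 26 - (-length).toNat)
        + (4 * side - 4 - length).toNat := by
  have h26 : pvAlphabet.length = 26 := rfl
  simp [pvLetters, pv_slice_length, h26, PySem.List.pyRepeat_singleton]

theorem pv_outer_length (side : Int) : (pvOuter side).length = pvM side := by
  simp [pvOuter, pvM, PySem.List.length_pyRange_neg_one, PySem.List.length_pyRange_one]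
  omega

theorem pv_outer_getD (side : Int) (i : Nat) (hi : i < pvM side) :
    PySem.List.pyGetD (pvOuter side) (i : Int) 0
      = (if (i : Int) ≤ side - 2 then side - 2 - (i : Int) else (i : Int) - side + 2) := by
  have hside : 2 ≤ side := by
    by_contra h
    simp [pvM, if_neg h] at hi
  have hm : i < (2 * side - 3).toNat := by simpa [pvM, if_pos hside] using hi
  rw [pvOuter, PySem.List.pyRange_neg_one, PySem.List.pyRange_one, PySem.List.pyGetD_natCast]
  simp only [List.getD_eq_getElem?_getD, List.getElem?_append, List.getElem?_map,
    List.length_map, List.length_range]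
  by_cases h2 : i < (side - 2 - (-1)).toNat
  · rw [if_pos h2, List.getElem?_eq_getElem (by simpa using h2)]
    simp only [List.getElem_range, Option.map_some, Option.getD_some]
    rw [if_pos (by omega)]
  · rw [if_neg h2, List.getElem?_eq_getElem (by simp; omega)]
    simp only [List.getElem_range, Option.map_some, Option.getD_some]
    rw [if_neg (by omega)]
    omega

theorem pv_inner1_fold (l : List Int) : ∀ j : Nat,
    l.foldl (fun acc _ => acc ++ [acc.getLastD 0 + 2]) ((List.range (j + 1)).map pvG)
      = (List.range (j + 1 + l.length)).map pvG := by
  induction l with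
  | nil => intro j; simp
  | cons a l ih =>
      intro j
      rw [List.foldl_cons]
      have hlast : (((List.range (j + 1)).map pvG).getLastD 0) = pvG j := by
        rw [List.range_succ, List.map_append]
        simp
      have hstep : ((List.range (j + 1)).map pvG) ++ [((List.range (j + 1)).map pvG).getLastD 0 + 2]
            = (List.range (j + 2)).map pvG := by
        rw [hlast, List.range_succ (n := j + 1), List.map_append]
        simp [pvG]
        ring
      rw [hstep]
      have h := ih (j + 1)
      rw [show j + 2 = j + 1 + 1 from rfl, h]
      congr 2
      simp only [List.length_cons]
      omega

theorem pv_inner_eq (side : Int) (hside : 2 ≤ side) :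
    pvInner side
      = ((List.range (side - 1).toNat).map pvG) ++
        ((List.range (side - 1).toNat).map pvG).dropLast.reverse := by
  have h1 : ([1] : List Int) = (List.range 1).map pvG := by decide
  rw [pvInner]
  have hlen : (PySem.List.pyRange 0 (side - 2) 1).length = (side - 2).toNat := by
    simp [PySem.List.length_pyRange_one]
  have hf := pv_inner1_fold (PySem.List.pyRange 0 (side - 2) 1) 0
  simp only [Nat.zero_add] at hf
  rw [h1, hf, hlen]
  have h2 : 1 + (side - 2).toNat = (side - 1).toNat := by omega
  rw [h2]

theorem pv_inner_getD (side : Int) (i : Nat) (hi : i < pvM side) :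
    PySem.List.pyGetD (pvInner side) (i : Int) 0
      = (if (i : Int) ≤ side - 2 then 2 * (i : Int) + 1 else 4 * side - 7 - 2 * (i : Int)) := by
  have hside : 2 ≤ side := by
    by_contra h
    simp [pvM, if_neg h] at hi
  have hm : i < (2 * side - 3).toNat := by simpa [pvM, if_pos hside] using hi
  rw [pv_inner_eq side hside, PySem.List.pyGetD_natCast]
  simp only [List.getD_eq_getElem?_getD, List.getElem?_append, List.length_map,
    List.length_range]
  by_cases h2 : i < (side - 1).toNat
  · rw [if_pos h2, List.getElem?_eq_getElem (by simpa using h2)]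
    simp only [List.getElem_map, List.getElem_range]
    rw [if_pos (by omega)]
    simp [pvG]
  · rw [if_neg h2, List.getElem?_eq_getElem ?hb]
    case hb =>
      simp [List.length_reverse, List.length_dropLast]
      omega
    rw [List.getElem_reverse]
    simp only [List.length_dropLast, List.length_map, List.length_range]
    rw [List.getElem_dropLast, List.getElem_map, List.getElem_range]
    rw [if_neg (by omega)]
    simp [pvG]
    omega

theorem pv_step_eval (side : Int) (cw : Bool) (L : List Char) (d : List Char) (k : Nat)
    (hk : k < pvM side) (hn : 2 * pvM side + 2 ≤ L.length) :
    pvStepA cw (pvOuter side) (pvInner side)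
        (d, (L.drop (k + 1)).take (L.length - 1 - 2 * k)) k
      = (d ++ (pvRowB side L (L.length) cw k ++ ['\n']),
         (L.drop (k + 1 + 1)).take (L.length - 1 - 2 * (k + 1))) := by
  have hnk : 2 * k + 4 ≤ L.length := by omega
  have ht : 0 < L.length - 1 - 2 * k := by omega
  have hle : (k + 1) + (L.length - 1 - 2 * k) ≤ L.length := by omega
  have hlast : ((L.drop (k + 1)).take (L.length - 1 - 2 * k)).getLastD '!'
      = L.getD (L.length - 1 - k) '!' := by
    rw [pv_getLastD_drop_take L (k + 1) _ '!' ht hle]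
    congr 1
    omega
  have hfrontIdx : ((k : Int) + 1) = (((k + 1 : Nat) : Nat) : Int) := by push_cast; ring
  have hbackIdx : ((L.length : Int) - 1 - (k : Int)) = (((L.length - 1 - k : Nat) : Nat) : Int) := by
    omega
  have hfront : PySem.List.pyGetD L ((k : Int) + 1) '!' = L.getD (k + 1) '!' := by
    rw [hfrontIdx, PySem.List.pyGetD_natCast]
  have hback : PySem.List.pyGetD L ((L.length : Int) - 1 - (k : Int)) '!'
      = L.getD (L.length - 1 - k) '!' := by
    rw [hbackIdx, PySem.List.pyGetD_natCast]
  cases cw with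
  | true =>
      simp only [pvStepA, if_true]
      rw [hlast]
      rw [pv_dropLast_drop_take L (k + 1) _ hle]
      rw [pv_headD_drop_take L (k + 1) _ '!' (by omega) (by omega)]
      rw [pv_tail_drop_take]
      refine Prod.ext ?_ ?_
      · simp only [pvRowB]
        rw [pv_outer_getD side k hk, pv_inner_getD side k hk, hfront, hback]
        simp
      · simp only []
        congr 1
        try omega
  | false =>
      simp only [pvStepA, Bool.false_eq_true, if_false]
      rw [pv_headD_drop_take L (k + 1) _ '!' (by omega) (by omega)]
      rw [pv_tail_drop_take]
      rw [pv_getLastD_drop_take L (k + 1 + 1) _ '!' (by omega) (by omega)]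
      rw [pv_dropLast_drop_take L (k + 1 + 1) _ (by omega)]
      refine Prod.ext ?_ ?_
      · simp only [pvRowB]
        rw [pv_outer_getD side k hk, pv_inner_getD side k hk, hfront, hback]
        simp
        congr 2
        try omega
      · simp only []
        congr 1
        try omega

theorem pv_loop (side : Int) (cw : Bool) (L : List Char) (d0 : List Char) (k : Nat)
    (hk : k ≤ pvM side) (hn : 2 * pvM side + 2 ≤ L.length) :
    (List.range k).foldl (pvStepA cw (pvOuter side) (pvInner side))
        (d0, (L.drop 1).take (L.length - 1))
      = (d0 ++ ((List.range k).map (fun i => pvRowB side L (L.length) cw i ++ ['\n'])).flatten,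
         (L.drop (k + 1)).take (L.length - 1 - 2 * k)) := by
  induction k with
  | zero => simp
  | succ k ih =>
      have hk' : k ≤ pvM side := by omega
      rw [List.range_succ, List.foldl_append, ih hk']
      rw [List.foldl_cons, List.foldl_nil]
      rw [pv_step_eval side cw L _ k (by omega) hn]
      rw [List.map_append, List.flatten_append]
      simp

theorem pv_main (side length : Int) (cw : Bool) (hpre : Pre_hollow_diamond side length cw) :
    hollow_diamond side length cw = hollow_diamond_alt side length cw := by
  have hn : 2 * pvM side + 2 ≤ (pvLetters side length).length := by
    rw [pv_letters_length]
    unfold Pre_hollow_diamond at hpre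
    unfold pvM
    split_ifs at hpre ⊢ <;> omega
  have hmn : 2 * pvM side + 2 ≤ (pvLetters side length).length := hn
  simp only [hollow_diamond, hollow_diamond_alt]
  rw [pv_outer_length]
  have htail : (pvLetters side length).tail
      = ((pvLetters side length).drop 1).take ((pvLetters side length).length - 1) := by
    rw [← List.drop_one, List.take_of_length_le (by simp)]
  rw [htail, pv_loop side cw (pvLetters side length) _ (pvM side) (le_refl _) hn]
  have hlast : (((pvLetters side length).drop (pvM side + 1)).take
        ((pvLetters side length).length - 1 - 2 * pvM side)).getLastD '!'
      = (pvLetters side length).getD ((pvLetters side length).length - 1 - pvM side) '!' := by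
    rw [pv_getLastD_drop_take _ _ _ '!' (by omega) (by omega)]
    congr 1
    omega
  have hm : (if (2:Int) ≤ side then 2 * side - 3 else 0).toNat = pvM side := rfl
  have hcl : PySem.List.pyGetD (pvLetters side length)
        (((pvLetters side length).length : Int) - 1 - (if (2:Int) ≤ side then 2 * side - 3 else 0)) '!'
      = (pvLetters side length).getD ((pvLetters side length).length - 1 - pvM side) '!' := by
    have hq : (((pvLetters side length).length : Int) - 1 - (if (2:Int) ≤ side then 2 * side - 3 else 0))
        = (((pvLetters side length).length - 1 - pvM side : Nat) : Int) := by
      unfold pvM at *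
      split_ifs <;> omega
    rw [hq, PySem.List.pyGetD_natCast]
  have hc0 : (pvLetters side length).headD '!' = PySem.List.pyGetD (pvLetters side length) 0 '!' := by
    rw [pv_headD_eq_getD, PySem.List.pyGetD_zero]
  rw [hlast, hm, hcl, hc0]
  dsimp only
  simp only [List.cons_append]
  rw [pv_join_cons]
  congr 1
  have hshift := pv_shift '\n'
      ((List.range (pvM side)).map (pvRowB side (pvLetters side length) ((pvLetters side length).length) cw))
      (PySem.List.pyRepeat [' '] (side - 1) ++
        [(pvLetters side length).getD ((pvLetters side length).length - 1 - pvM side) '!'])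
  have hrw : (List.range (pvM side)).map
        (fun i => pvRowB side (pvLetters side length) ((pvLetters side length).length) cw i ++ ['\n'])
      = ((List.range (pvM side)).map (pvRowB side (pvLetters side length) ((pvLetters side length).length) cw)).map
        (fun r => r ++ ['\n']) := by
    rw [List.map_map]
    rfl
  simp only [List.map_append, List.map_cons, List.map_nil, List.flatten_append,
    List.flatten_cons, List.flatten_nil, List.nil_append, List.append_nil,
    List.append_assoc] at hshift ⊢
  rw [hrw, hshift]

-- ===== VERDICT (by name: the statement is the Claim_ definition above) =====
theorem hollow_diamond_spec : Claim_equal_hollow_diamond := by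
  intro side length cw _hdom hpre
  unfold Spec_hollow_diamond
  exact pv_main side length cw hpre
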